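-- pv_equiv track=rewrite | github.com/ruthhhs/UnivCodeJourney | semester_1/praktikum/daspro_7/A1/duelSihir.py | snape
-- ===== SOURCE A (Python) =====
-- def konso(e, L):
--     return [e] + L
--
-- def firstElmt(L):
--     return L[0]
--
-- def tail(L):
--     return L[1:]
--
-- def isEmpty(L):
--     return L == []
--
-- def snape(S, M) :
--     if isEmpty(S) and isEmpty(M) :
--         return []
--     else :
--         if firstElmt(S) > firstElmt(M) :
--             return konso(1, snape(tail(S), tail(M)))
--         else :
--             return konso(0, snape(tail(S), tail(M)))
-- ===== SOURCE B (Python) =====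
-- def snape(S, M):
--     return [1 if s > m else 0 for s, m in zip(S, M)]
-- ===== Notes on version B (the rewrite author's own statement) =====
-- stated objective: idiomatic
-- what changed: Replaces the konso/firstElmt/tail structural recursion with a single zip comprehension mapping each pair to 1/0; Pre_ excludes unequal-length lists, on which A raises IndexError.
import Mathlib
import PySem

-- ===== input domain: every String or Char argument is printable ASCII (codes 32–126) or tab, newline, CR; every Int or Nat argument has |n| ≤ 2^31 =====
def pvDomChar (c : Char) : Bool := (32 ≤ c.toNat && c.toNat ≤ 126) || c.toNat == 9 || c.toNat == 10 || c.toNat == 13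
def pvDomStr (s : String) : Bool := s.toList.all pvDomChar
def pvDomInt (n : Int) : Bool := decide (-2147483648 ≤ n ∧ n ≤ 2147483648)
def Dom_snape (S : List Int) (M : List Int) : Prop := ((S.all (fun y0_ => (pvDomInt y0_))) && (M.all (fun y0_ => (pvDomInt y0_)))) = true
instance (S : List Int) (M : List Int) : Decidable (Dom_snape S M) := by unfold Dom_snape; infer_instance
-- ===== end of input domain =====

-- B replaces A's structural recursion by a zip comprehension; equivalence is about the return value on equal-length lists.

-- ===== PORT A =====
-- A's recursion: if both empty return []; else compare heads and cons 1/0 onto the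
-- recursive call on the tails. When exactly one list is empty, firstElmt raises
-- IndexError in Python (excluded by Pre_snape); the port returns [] there.
def snape (S : List Int) (M : List Int) : List Int :=
  if S = [] ∧ M = [] then []
  else
    match S, M with
    | s :: st, m :: mt =>
        if s > m then 1 :: snape st mt else 0 :: snape st mt
    | _, _ => []  -- Python raises IndexError here; outside Pre_snape

-- ===== PORT B =====
def snape_alt (S : List Int) (M : List Int) : List Int :=
  (S.zip M).map (fun p => if p.1 > p.2 then (1 : Int) else 0)

-- ===== PRECONDITION & SPEC =====
-- Pre_ excludes exactly the inputs where A raises IndexError: unequal lengths.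
def Pre_snape (S : List Int) (M : List Int) : Prop := S.length = M.length
instance (S : List Int) (M : List Int) : Decidable (Pre_snape S M) := by unfold Pre_snape; infer_instance
def pvWitness_snape : List Int × List Int := ([3, 1, 2], [2, 5, 2])

def Spec_snape (S : List Int) (M : List Int) (out : List Int) : Prop := out = snape_alt S M
instance (S : List Int) (M : List Int) (out : List Int) : Decidable (Spec_snape S M out) := by unfold Spec_snape; infer_instance

-- ===== CLAIM (what is proved, stated in full; the proofs are below) =====
def Claim_equal_snape : Prop := ∀ (S : List Int) (M : List Int), Dom_snape S M → Pre_snape S M → Spec_snape S M (snape S M)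

-- ===== LEMMAS AND PROOFS =====
theorem snape_eq_alt_of_len : ∀ (S M : List Int), S.length = M.length → snape S M = snape_alt S M := by
  intro S
  induction S with
  | nil =>
      intro M h
      cases M with
      | nil => simp [snape, snape_alt]
      | cons m mt => simp at h
  | cons s st ih =>
      intro M h
      cases M with
      | nil => simp at h
      | cons m mt =>
          simp at h
          by_cases hc : s > m <;> simp [snape, snape_alt, hc, ih mt h]

-- ===== VERDICT (by name: the statement is the Claim_ definition above) =====
theorem snape_spec : Claim_equal_snape := by
  intro S M _ hpre
  exact snape_eq_alt_of_len S M hpre
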